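-- pv_equiv track=rewrite | github.com/bharath23/hackerrank | algorithms/warmup/acm_icpc_team.py | findTeams
-- ===== SOURCE A (Python) =====
-- def findTeams(n, m, a):
--     max_topics = 0
--     max_teams = 0
--     for i, topics1 in enumerate(a):
--         for _, topics2 in enumerate(a[i+1:]):
--             t1 = int(topics1, 2)
--             t2 = int(topics2, 2)
--             topics = bin(t1 | t2).count("1")
--             if (topics > max_topics):
--                 max_topics = topics
--                 max_teams = 1
--             elif (topics == max_topics):
--                 max_teams += 1
--
--     return max_teams, max_topics
-- ===== SOURCE B (Python) =====
-- def findTeams(n, m, a):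
--     cnt = {}
--     for t in a:
--         v = int(t, 2)
--         cnt[v] = cnt.get(v, 0) + 1
--     vals = list(cnt)
--     max_topics = 0
--     max_teams = 0
--     for i, x in enumerate(vals):
--         for y in vals[i:]:
--             pairs = cnt[x] * (cnt[x] - 1) // 2 if x == y else cnt[x] * cnt[y]
--             if pairs == 0:
--                 continue
--             topics = bin(x | y).count("1")
--             if topics > max_topics:
--                 max_topics = topics
--                 max_teams = pairs
--             elif topics == max_topics:
--                 max_teams += pairs
--     return max_teams, max_topics
-- ===== Notes on version B (the rewrite author's own statement) =====
-- stated objective: faster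
-- what changed: B builds a dict counting occurrences of each distinct parsed bitmask, then aggregates max/ties over pairs of DISTINCT values weighted by pair multiplicities (cnt[x]*cnt[y], or C(cnt[x],2) on the diagonal), instead of A's scan over all index pairs with per-pair re-parsing.
-- outside the precondition, e.g. on findTeams(1, 2, ['']): A returns (0, 0), B raises ValueError
import Mathlib
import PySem

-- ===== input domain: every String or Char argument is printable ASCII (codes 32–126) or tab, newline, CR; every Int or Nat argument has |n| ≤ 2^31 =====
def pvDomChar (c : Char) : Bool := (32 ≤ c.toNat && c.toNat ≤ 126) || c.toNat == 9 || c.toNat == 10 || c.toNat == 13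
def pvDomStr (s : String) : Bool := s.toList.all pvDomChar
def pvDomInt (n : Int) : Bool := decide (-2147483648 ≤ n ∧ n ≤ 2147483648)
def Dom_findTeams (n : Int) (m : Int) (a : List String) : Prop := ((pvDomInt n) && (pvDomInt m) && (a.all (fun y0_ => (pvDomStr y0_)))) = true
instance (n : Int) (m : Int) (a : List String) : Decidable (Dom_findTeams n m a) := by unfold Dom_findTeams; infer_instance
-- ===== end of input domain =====

-- B groups equal topic bitmasks in a counter and aggregates over pairs of DISTINCT values with
-- multiplicities (measured faster on duplicate-heavy inputs), instead of A's loop over all index pairs.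

-- ===== PORT A =====
-- int(s, 2), totalized with 0; Pre_ guarantees the parse succeeds
def pvParse (s : String) : Int := (PySem.Int.ofStrBase? s 2).getD 0

def findTeams (n : Int) (m : Int) (a : List String) : Int × Int :=
  (PySem.List.enumerate a).foldl
    (fun (s : Int × Int) (p : Int × String) =>
      (PySem.List.enumerate (PySem.List.slice a (some (p.1 + 1)) none)).foldl
        (fun (s : Int × Int) (q : Int × String) =>
          let t1 := pvParse p.2
          let t2 := pvParse q.2
          -- bin(t1 | t2).count("1") = (t1 | t2).bit_count() (both read |·|)
          let topics : Int := (PySem.Int.bitCount (PySem.Int.bor t1 t2) : Int)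
          if topics > s.2 then (1, topics)
          else if topics = s.2 then (s.1 + 1, s.2) else s) s)
    (0, 0)

-- ===== PORT B =====
def findTeams_alt (n : Int) (m : Int) (a : List String) : Int × Int :=
  let cnt : PySem.Dict Int Int :=
    a.foldl (fun d t =>
      let v := pvParse t
      d.insert v (d.getD v 0 + 1)) PySem.Dict.empty
  let vals := PySem.Dict.keys cnt
  (PySem.List.enumerate vals).foldl
    (fun (s : Int × Int) (p : Int × Int) =>
      (PySem.List.slice vals (some p.1) none).foldl
        (fun (s : Int × Int) (y : Int) =>
          let pairs : Int :=
            if p.2 = y then PySem.Int.floordiv (cnt.getD p.2 0 * (cnt.getD p.2 0 - 1)) 2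
            else cnt.getD p.2 0 * cnt.getD y 0
          if pairs = 0 then s
          else
            let topics : Int := (PySem.Int.bitCount (PySem.Int.bor p.2 y) : Int)
            if topics > s.2 then (pairs, topics)
            else if topics = s.2 then (s.1 + pairs, s.2) else s) s)
    (0, 0)

-- ===== PRECONDITION & SPEC =====
-- Pre_ excludes inputs containing a string int(·,2) cannot parse: with ≥ 2 elements Python A raises
-- ValueError there too, but with exactly one bad element A returns (0, 0) without ever parsing it,
-- while B — which parses every string once up front — raises ValueError.
def Pre_findTeams (n : Int) (m : Int) (a : List String) : Prop :=
  ∀ s ∈ a, (PySem.Int.ofStrBase? s 2).isSome = true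
instance (n : Int) (m : Int) (a : List String) : Decidable (Pre_findTeams n m a) := by
  unfold Pre_findTeams; infer_instance

def pvWitness_findTeams : Int × Int × List String := (3, 2, ["10", "01", "11"])

def Spec_findTeams (n : Int) (m : Int) (a : List String) (out : Int × Int) : Prop := out = findTeams_alt n m a
instance (n : Int) (m : Int) (a : List String) (out : Int × Int) : Decidable (Spec_findTeams n m a out) := by unfold Spec_findTeams; infer_instance

-- ===== CLAIM (what is proved, stated in full; the proofs are below) =====
def Claim_equal_findTeams : Prop := ∀ (n : Int) (m : Int) (a : List String), Dom_findTeams n m a → Pre_findTeams n m a → Spec_findTeams n m a (findTeams n m a)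

-- ===== LEMMAS AND PROOFS =====

-- popcount of the OR of two parsed values, the quantity both programs maximize
def pvScore (x y : Int) : Int := (PySem.Int.bitCount (PySem.Int.bor x y) : Int)

-- A's accumulator step on one pair score
def pvStep (s : Int × Int) (t : Int) : Int × Int :=
  if t > s.2 then (1, t) else if t = s.2 then (s.1 + 1, s.2) else s

-- B's accumulator step on one (score, multiplicity) entry
def wStep (s : Int × Int) (q : Int × Int) : Int × Int :=
  if q.2 = 0 then s
  else if q.1 > s.2 then (q.2, q.1)
  else if q.1 = s.2 then (s.1 + q.2, s.2) else s

-- the flat list of pair scores A traverses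
def pairScores : List Int → List Int
  | [] => []
  | x :: t => t.map (pvScore x) ++ pairScores t

-- one (score, multiplicity) entry of B's grouped traversal
def pvEnt (c : Int → Int) (x y : Int) : Int × Int :=
  (pvScore x y,
   if x = y then PySem.Int.floordiv (c x * (c x - 1)) 2 else c x * c y)

-- the grouped entry list B traverses (rows over the distinct-value list)
def pvW (c : Int → Int) : List Int → List (Int × Int)
  | [] => []
  | x :: t => (x :: t).map (pvEnt c x) ++ pvW c t

-- expand a weighted list into the multiset of scores it represents
def expandW (W : List (Int × Int)) : List Int :=
  W.flatMap (fun q => List.replicate q.2.toNat q.1)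

theorem pvScore_comm (x y : Int) : pvScore x y = pvScore y x := by
  simp [pvScore, PySem.Int.bor_comm]

-- ---------- A side ----------

theorem lemA (a : List String) : ∀ (d : List String) (s : Nat) (st : Int × Int),
    a.drop s = d →
    (PySem.List.enumerate d (s : Int)).foldl
      (fun st p => (PySem.List.slice a (some (p.1 + 1)) none).foldl
        (fun st t2 => pvStep st (pvScore (pvParse p.2) (pvParse t2))) st) st
    = (pairScores (d.map pvParse)).foldl pvStep st := by
  intro d
  induction d with
  | nil => intro s st h; simp [PySem.List.enumerate_nil, pairScores]
  | cons x rest ih =>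
    intro s st h
    have hdrop : a.drop (s + 1) = rest := by rw [← List.tail_drop, h]; rfl
    rw [PySem.List.enumerate_cons, List.foldl_cons]
    have hcast : ((s : Int) + 1) = ((s + 1 : Nat) : Int) := by push_cast; ring
    rw [hcast, PySem.List.slice_from_natCast, hdrop]
    have hinner : ∀ st : Int × Int,
        rest.foldl (fun st t2 => pvStep st (pvScore (pvParse x) (pvParse t2))) st
          = ((rest.map pvParse).map (pvScore (pvParse x))).foldl pvStep st := by
      intro st; rw [List.foldl_map, List.foldl_map]
    rw [hinner, ih (s + 1) _ hdrop]
    simp [pairScores, List.map_map, List.foldl_append]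

theorem findTeams_eq_pairs (n m : Int) (a : List String) :
    findTeams n m a = (pairScores (a.map pvParse)).foldl pvStep (0, 0) := by
  unfold findTeams
  have hfun : ∀ (st : Int × Int) (p : Int × String),
      (PySem.List.enumerate (PySem.List.slice a (some (p.1 + 1)) none)).foldl
        (fun (s : Int × Int) (q : Int × String) =>
          let t1 := pvParse p.2
          let t2 := pvParse q.2
          let topics : Int := (PySem.Int.bitCount (PySem.Int.bor t1 t2) : Int)
          if topics > s.2 then (1, topics)
          else if topics = s.2 then (s.1 + 1, s.2) else s) st
      = (PySem.List.slice a (some (p.1 + 1)) none).foldl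
          (fun st t2 => pvStep st (pvScore (pvParse p.2) (pvParse t2))) st := by
    intro st p
    conv_rhs => rw [← PySem.List.map_snd_enumerate (PySem.List.slice a (some (p.1 + 1)) none) 0]
    rw [List.foldl_map]
    rfl
  simp only [hfun]
  have h := lemA a a 0 (0, 0) rfl
  simpa using h

-- ---------- B side ----------

theorem lemB (ks : List Int) (c : Int → Int) : ∀ (d : List Int) (s : Nat) (st : Int × Int),
    ks.drop s = d →
    (PySem.List.enumerate d (s : Int)).foldl
      (fun st p => (PySem.List.slice ks (some p.1) none).foldl
        (fun st y => wStep st (pvEnt c p.2 y)) st) st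
    = (pvW c d).foldl wStep st := by
  intro d
  induction d with
  | nil => intro s st h; simp [PySem.List.enumerate_nil, pvW]
  | cons x rest ih =>
    intro s st h
    have hdrop : ks.drop (s + 1) = rest := by rw [← List.tail_drop, h]; rfl
    rw [PySem.List.enumerate_cons, List.foldl_cons, PySem.List.slice_from_natCast, h]
    have hcast : ((s : Int) + 1) = ((s + 1 : Nat) : Int) := by push_cast; ring
    rw [hcast, ih (s + 1) _ hdrop]
    rw [show (x :: rest).foldl (fun st y => wStep st (pvEnt c x y)) st
          = ((x :: rest).map (pvEnt c x)).foldl wStep st from (List.foldl_map ..).symm]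
    simp [pvW, List.foldl_append]

theorem findTeams_alt_eq (n m : Int) (a : List String) :
    findTeams_alt n m a
      = (pvW (fun v => ((a.map pvParse).count v : Int))
             (PySem.Set.ofList (a.map pvParse))).foldl wStep (0, 0) := by
  have hcnt : a.foldl (fun d t =>
        let v := pvParse t
        d.insert v (d.getD v 0 + 1)) PySem.Dict.empty
      = PySem.Dict.counter (a.map pvParse) := by
    rw [← PySem.Dict.foldl_insert_getD_add_one_eq_counter (a.map pvParse), List.foldl_map]
  simp only [findTeams_alt, hcnt, PySem.Dict.keys_counter, PySem.Dict.getD_counter]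
  exact lemB (PySem.Set.ofList (a.map pvParse))
    (fun v => ((a.map pvParse).count v : Int))
    (PySem.Set.ofList (a.map pvParse)) 0 (0, 0) rfl

-- ---------- running-max/count characterization ----------

theorem foldl_pvStep_char (L : List Int) : ∀ (c M : Int), M ≤ L.foldl max M →
    L.foldl pvStep (c, M) =
      ((if L.foldl max M = M then c + (L.count M : Int)
       else ((L.count (L.foldl max M) : Int))), L.foldl max M) := by
  induction L with
  | nil => intro c M _; simp
  | cons t L ih =>
    intro c M _
    have hKle : ∀ N : Int, N ≤ List.foldl max N L := fun N => (PySem.List.le_foldl_max L N).1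
    simp only [List.foldl_cons]
    rcases lt_trichotomy M t with h | h | h
    · rw [show pvStep (c, M) t = (1, t) by simp [pvStep, h], max_eq_right h.le,
        ih 1 t (hKle t)]
      have hKt : t ≤ List.foldl max t L := hKle t
      have hKM : M < List.foldl max t L := lt_of_lt_of_le h hKt
      by_cases he : List.foldl max t L = t
      · simp [he, h.ne', List.count_cons, Prod.ext_iff]; omega
      · simp [he, hKM.ne', List.count_cons, Prod.ext_iff,
          (show t ≠ List.foldl max t L from fun hh => he hh.symm)]
    · subst h
      rw [show pvStep (c, M) M = (c + 1, M) by simp [pvStep], max_self,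
        ih (c + 1) M (hKle M)]
      by_cases he : List.foldl max M L = M
      · simp [he, List.count_cons, Prod.ext_iff]; omega
      · simp [he, List.count_cons, Prod.ext_iff,
          (show M ≠ List.foldl max M L from fun hh => he hh.symm)]
    · rw [show pvStep (c, M) t = (c, M) by simp [pvStep, not_lt.mpr h.le, h.ne],
        max_eq_left h.le, ih c M (hKle M)]
      have hKM : M ≤ List.foldl max M L := hKle M
      by_cases he : List.foldl max M L = M
      · simp [he, List.count_cons, Prod.ext_iff, h.ne]
      · simp [he, List.count_cons, Prod.ext_iff,
          (show t ≠ List.foldl max M L from (lt_of_lt_of_le h hKM).ne)]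

theorem char0 (L : List Int) :
    L.foldl pvStep (0, 0) = (((L.count (L.foldl max 0)) : Int), L.foldl max 0) := by
  rw [foldl_pvStep_char L 0 0 (PySem.List.le_foldl_max L 0).1]
  by_cases he : L.foldl max 0 = 0 <;> simp [he]

-- ---------- weighted fold = fold over the expansion ----------

theorem repl_foldl : ∀ (w : Nat) (t : Int) (st : Int × Int),
    (List.replicate (w + 1) t).foldl pvStep st =
      (if t > st.2 then ((w : Int) + 1, t)
       else if t = st.2 then (st.1 + w + 1, st.2) else st) := by
  intro w
  induction w with
  | zero => intro t st; simp [pvStep]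
  | succ w ih =>
    intro t st
    rw [List.replicate_succ, List.foldl_cons, ih]
    rcases lt_trichotomy st.2 t with h | h | h
    · rw [show pvStep st t = (1, t) by simp [pvStep, h]]
      simp [h, Prod.ext_iff]; ring
    · rw [show pvStep st t = (st.1 + 1, st.2) by simp [pvStep, h]]
      simp [h.symm, Prod.ext_iff]; omega
    · rw [show pvStep st t = st by simp [pvStep, not_lt.mpr h.le, (show t ≠ st.2 by omega)]]
      simp [not_lt.mpr h.le, (show t ≠ st.2 by omega)]

theorem wexpand : ∀ (W : List (Int × Int)) (st : Int × Int), (∀ q ∈ W, 0 ≤ q.2) →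
    W.foldl wStep st = (expandW W).foldl pvStep st := by
  intro W
  induction W with
  | nil => intro st _; rfl
  | cons q rest ih =>
    intro st h
    have hq : 0 ≤ q.2 := h q List.mem_cons_self
    have hrest : ∀ p ∈ rest, 0 ≤ p.2 := fun p hp => h p (List.mem_cons_of_mem q hp)
    have hexp : expandW (q :: rest) = List.replicate q.2.toNat q.1 ++ expandW rest := by
      simp [expandW]
    rw [List.foldl_cons, hexp, List.foldl_append, ih _ hrest]
    congr 1
    by_cases h0 : q.2 = 0
    · simp [wStep, h0]
    · have hpos : 0 < q.2 := lt_of_le_of_ne hq (Ne.symm h0)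
      obtain ⟨w, hw⟩ : ∃ w : Nat, q.2.toNat = w + 1 := by
        refine ⟨q.2.toNat - 1, ?_⟩; omega
      have hcast : ((w : Int) + 1) = q.2 := by
        have := Int.toNat_of_nonneg hq
        omega
      rw [hw, repl_foldl]
      unfold wStep
      rw [if_neg h0]
      by_cases h1 : q.1 > st.2
      · simp [h1, hcast]
      · by_cases h2 : q.1 = st.2 <;> simp [h1, h2, Prod.ext_iff] <;> omega

-- ---------- multiset bookkeeping ----------

theorem flatMap_append_mset {α β : Type} (ks : List α) (g h : α → List β) :
    (↑(ks.flatMap (fun y => g y ++ h y)) : Multiset β)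
      = ↑(ks.flatMap g) + ↑(ks.flatMap h) := by
  induction ks with
  | nil => simp
  | cons z t ih =>
    simp only [List.flatMap_cons, ← Multiset.coe_add, ih]
    abel

theorem deltaRep {β : Type} (x : Int) (n : Nat) (g : Int → β) :
    ∀ (ks : List Int), ks.Nodup → x ∈ ks →
    (↑(ks.flatMap (fun y => List.replicate (if y = x then n else 0) (g y))) : Multiset β)
      = Multiset.replicate n (g x) := by
  intro ks
  induction ks with
  | nil => simp
  | cons z t ih =>
    intro hnd hx
    rcases List.mem_cons.mp hx with hz | hx'
    · subst hz
      have hnot : ∀ y ∈ t, ¬ (y = x) := fun y hy he => (List.nodup_cons.mp hnd).1 (he ▸ hy)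
      have ht : t.flatMap (fun y => List.replicate (if y = x then n else 0) (g y)) = [] := by
        rw [List.flatMap_eq_nil_iff]
        intro y hy; simp [hnot y hy]
      simp [ht, Multiset.coe_replicate]
    · have hz : z ≠ x := fun he => (List.nodup_cons.mp hnd).1 (he ▸ hx')
      simp only [List.flatMap_cons, if_neg hz, List.replicate_zero, List.nil_append]
      exact ih (List.nodup_cons.mp hnd).2 hx'

theorem countExpand (ks : List Int) (f : Int → Int) (hnd : ks.Nodup) :
    ∀ (l : List Int), (∀ y ∈ l, y ∈ ks) →
    (↑(ks.flatMap (fun y => List.replicate (l.count y) (f y))) : Multiset Int)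
      = ↑(l.map f) := by
  intro l
  induction l with
  | nil => simp
  | cons w t ih =>
    intro hmem
    have hw : w ∈ ks := hmem w List.mem_cons_self
    simp only [List.count_cons, List.replicate_add]
    have hsw : (fun y => List.replicate (if (w == y) = true then 1 else 0) (f y))
        = (fun y => List.replicate (if y = w then 1 else 0) (f y)) := by
      funext y
      by_cases h : y = w
      · subst h; simp
      · simp [beq_iff_eq, h, Ne.symm h]
    rw [flatMap_append_mset, hsw, ih (fun y hy => hmem y (List.mem_cons_of_mem w hy)),
        deltaRep w 1 f ks hnd hw]
    rw [Multiset.replicate_one, List.map_cons, ← Multiset.cons_coe, ← Multiset.singleton_add, add_comm]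

theorem pairScores_append (x : Int) : ∀ (l : List Int),
    (↑(pairScores (l ++ [x])) : Multiset Int)
      = ↑(pairScores l) + ↑(l.map (fun y => pvScore y x)) := by
  intro l
  induction l with
  | nil => simp [pairScores]
  | cons z t ih =>
    simp only [List.cons_append, pairScores, List.map_append, List.map_cons, List.map_nil,
      ← Multiset.coe_add, ih]
    rw [show (↑(pvScore z x :: List.map (fun y => pvScore y x) t) : Multiset Int)
          = {pvScore z x} + ↑(List.map (fun y => pvScore y x) t) from
        by rw [Multiset.singleton_add, Multiset.cons_coe], Multiset.coe_singleton]
    abel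

theorem pvW_congr (c₁ c₂ : Int → Int) : ∀ (ks : List Int),
    (∀ y ∈ ks, c₁ y = c₂ y) → pvW c₁ ks = pvW c₂ ks := by
  intro ks
  induction ks with
  | nil => intro _; rfl
  | cons z t ih =>
    intro h
    simp only [pvW]
    rw [ih (fun y hy => h y (List.mem_cons_of_mem z hy))]
    congr 1
    apply List.map_congr_left
    intro y hy
    have hz := h z List.mem_cons_self
    have hyy := h y hy
    simp [pvEnt, hz, hyy]

theorem fdiv_step (c : Int) :
    PySem.Int.floordiv ((c + 1) * c) 2 = PySem.Int.floordiv (c * (c - 1)) 2 + c := by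
  rw [PySem.Int.floordiv_eq_ediv_of_pos (by norm_num : (0:Int) < 2),
      PySem.Int.floordiv_eq_ediv_of_pos (by norm_num : (0:Int) < 2)]
  have h : (c + 1) * c = c * (c - 1) + c * 2 := by ring
  rw [h, Int.add_mul_ediv_right _ _ (by norm_num)]

theorem fdiv_diag_nonneg (c : Int) (h : 0 ≤ c) :
    0 ≤ PySem.Int.floordiv (c * (c - 1)) 2 := by
  rw [PySem.Int.floordiv_eq_ediv_of_pos (by norm_num : (0:Int) < 2)]
  apply Int.ediv_nonneg _ (by norm_num)
  rcases lt_or_ge c 1 with h1 | h1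
  · have : c = 0 := by omega
    simp [this]
  · exact mul_nonneg h (by omega)

theorem weights_nonneg (c : Int → Int) : ∀ (ks : List Int), (∀ y ∈ ks, 0 ≤ c y) →
    ∀ q ∈ pvW c ks, 0 ≤ q.2 := by
  intro ks
  induction ks with
  | nil => intro _ q hq; simp [pvW] at hq
  | cons z t ih =>
    intro h q hq
    simp only [pvW, List.mem_append] at hq
    rcases hq with hq | hq
    · rcases List.mem_map.mp hq with ⟨y, hy, rfl⟩
      have hz : 0 ≤ c z := h z List.mem_cons_self
      have hcy : 0 ≤ c y := h y hy
      by_cases he : z = y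
      · have h2 : (pvEnt c z y).2 = PySem.Int.floordiv (c z * (c z - 1)) 2 := by
          simp only [pvEnt, if_pos he]
        rw [h2]; exact fdiv_diag_nonneg _ hz
      · have h2 : (pvEnt c z y).2 = c z * c y := by
          simp only [pvEnt, if_neg he]
        rw [h2]; exact mul_nonneg hz hcy
    · exact ih (fun y hy => h y (List.mem_cons_of_mem z hy)) q hq

theorem expandW_append (u v : List (Int × Int)) :
    expandW (u ++ v) = expandW u ++ expandW v := by
  simp [expandW]

theorem expandW_map (l : List Int) (g : Int → Int × Int) :
    expandW (l.map g) = l.flatMap (fun y => List.replicate (g y).2.toNat (g y).1) := by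
  simp [expandW, List.flatMap_map]

theorem bump (x : Int) : ∀ (ks : List Int) (c : Int → Int), ks.Nodup → x ∈ ks →
    (∀ y ∈ ks, 0 ≤ c y) →
    (↑(expandW (pvW (fun v => c v + if v = x then 1 else 0) ks)) : Multiset Int)
      = ↑(expandW (pvW c ks))
        + ↑(ks.flatMap (fun y => List.replicate (c y).toNat (pvScore x y))) := by
  intro ks
  induction ks with
  | nil => intro c hnd hx hc; simp at hx
  | cons z t ih =>
    intro c hnd hx hc
    obtain ⟨hz_nt, hndt⟩ := List.nodup_cons.mp hnd
    have hcz : 0 ≤ c z := hc z List.mem_cons_self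
    have hct : ∀ y ∈ t, 0 ≤ c y := fun y hy => hc y (List.mem_cons_of_mem z hy)
    set c' : Int → Int := fun v => c v + if v = x then 1 else 0 with hcdef
    rcases List.mem_cons.mp hx with hxz | hxt
    · -- x is the head
      subst hxz
      have hrow : (x :: t).map (pvEnt c' x)
          = (pvScore x x, PySem.Int.floordiv (c x * (c x - 1)) 2 + c x)
            :: t.map (fun y => (pvScore x y, c x * c y + c y)) := by
        simp only [List.map_cons]
        congr 1
        · have h1 : c' x = c x + 1 := by simp [hcdef]
          simp only [pvEnt, if_pos rfl, h1]
          rw [show (c x + 1) * (c x + 1 - 1) = (c x + 1) * c x by ring, fdiv_step]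
          simp
        · apply List.map_congr_left
          intro y hy
          have hyx : ¬ (x = y) := fun h => hz_nt (h ▸ hy)
          have hyx' : ¬ (y = x) := fun h => hyx h.symm
          have h1 : c' x = c x + 1 := by simp [hcdef]
          have h2 : c' y = c y := by simp [hcdef, hyx']
          simp only [pvEnt, if_neg hyx, h1, h2]
          rw [show (c x + 1) * c y = c x * c y + c y by ring]
      have htail : pvW c' t = pvW c t := by
        apply pvW_congr
        intro y hy
        have hyx : ¬ (y = x) := fun h => hz_nt (h ▸ hy)
        simp [hcdef, if_neg hyx]
      have hsplit : t.flatMap (fun y => List.replicate (c x * c y + c y).toNat (pvScore x y))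
          = t.flatMap (fun y => List.replicate (c x * c y).toNat (pvScore x y)
              ++ List.replicate (c y).toNat (pvScore x y)) := by
        apply List.flatMap_congr
        intro y hy
        rw [Int.toNat_add (mul_nonneg hcz (hct y hy)) (hct y hy), List.replicate_add]
      have hrowc : (x :: t).map (pvEnt c x)
          = (pvScore x x, PySem.Int.floordiv (c x * (c x - 1)) 2)
            :: t.map (fun y => (pvScore x y, c x * c y)) := by
        simp only [List.map_cons]
        congr 1
        · simp [pvEnt]
        · apply List.map_congr_left
          intro y hy
          have hyx : ¬ (x = y) := fun h => hz_nt (h ▸ hy)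
          simp [pvEnt, if_neg hyx]
      rw [show pvW c' (x :: t) = (x :: t).map (pvEnt c' x) ++ pvW c' t from rfl,
          show pvW c (x :: t) = (x :: t).map (pvEnt c x) ++ pvW c t from rfl,
          expandW_append, expandW_append, hrow, hrowc, htail,
          show ∀ (q : Int × Int) (r : List (Int × Int)),
            expandW (q :: r) = List.replicate q.2.toNat q.1 ++ expandW r from fun q r => by
              simp [expandW],
          show ∀ (q : Int × Int) (r : List (Int × Int)),
            expandW (q :: r) = List.replicate q.2.toNat q.1 ++ expandW r from fun q r => by
              simp [expandW],
          expandW_map, expandW_map, List.flatMap_cons]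
      simp only [hsplit]
      rw [Int.toNat_add (fdiv_diag_nonneg _ hcz) hcz, List.replicate_add]
      simp only [← Multiset.coe_add, flatMap_append_mset]
      abel
    · -- x is in the tail
      have hzx : ¬ (z = x) := fun h => hz_nt (h ▸ hxt)
      have hrow : (z :: t).map (pvEnt c' z)
          = (pvScore z z, PySem.Int.floordiv (c z * (c z - 1)) 2)
            :: t.map (fun y => (pvScore z y, c z * c y
                + (if y = x then c z else 0))) := by
        simp only [List.map_cons]
        congr 1
        · have h1 : c' z = c z := by simp [hcdef, hzx]
          simp only [pvEnt, if_pos rfl, h1]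
          simp
        · apply List.map_congr_left
          intro y hy
          have hzy : ¬ (z = y) := fun h => hz_nt (h ▸ hy)
          have h1 : c' z = c z := by simp [hcdef, hzx]
          have h2 : c' y = c y + (if y = x then 1 else 0) := by simp [hcdef]
          simp only [pvEnt, if_neg hzy, h1, h2]
          by_cases hyx : y = x <;> simp [hyx] <;> ring
      have hsplit : t.flatMap (fun y => List.replicate (c z * c y
              + (if y = x then c z else 0)).toNat (pvScore z y))
          = t.flatMap (fun y => List.replicate (c z * c y).toNat (pvScore z y)
              ++ List.replicate (if y = x then (c z).toNat else 0) (pvScore z y)) := by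
        apply List.flatMap_congr
        intro y hy
        have h1 : (0:Int) ≤ (if y = x then c z else 0) := by
          by_cases hyx : y = x <;> simp [hyx, hcz]
        rw [Int.toNat_add (mul_nonneg hcz (hct y hy)) h1, List.replicate_add]
        congr 1
        by_cases hyx : y = x <;> simp [hyx]
      have hrowc : (z :: t).map (pvEnt c z)
          = (pvScore z z, PySem.Int.floordiv (c z * (c z - 1)) 2)
            :: t.map (fun y => (pvScore z y, c z * c y)) := by
        simp only [List.map_cons]
        congr 1
        · simp [pvEnt]
        · apply List.map_congr_left
          intro y hy
          have hzy : ¬ (z = y) := fun h => hz_nt (h ▸ hy)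
          simp [pvEnt, if_neg hzy]
      have hdelta : (↑(t.flatMap (fun y => List.replicate (if y = x then (c z).toNat else 0)
            (pvScore z y))) : Multiset Int)
          = Multiset.replicate (c z).toNat (pvScore z x) := by
        have := deltaRep x (c z).toNat (fun y => pvScore z y) t hndt hxt
        simpa using this
      rw [show pvW c' (z :: t) = (z :: t).map (pvEnt c' z) ++ pvW c' t from rfl,
          show pvW c (z :: t) = (z :: t).map (pvEnt c z) ++ pvW c t from rfl,
          expandW_append, expandW_append, hrow, hrowc,
          show ∀ (q : Int × Int) (r : List (Int × Int)),
            expandW (q :: r) = List.replicate q.2.toNat q.1 ++ expandW r from fun q r => by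
              simp [expandW],
          show ∀ (q : Int × Int) (r : List (Int × Int)),
            expandW (q :: r) = List.replicate q.2.toNat q.1 ++ expandW r from fun q r => by
              simp [expandW],
          expandW_map, expandW_map, List.flatMap_cons]
      simp only [hsplit]
      simp only [← Multiset.coe_add, flatMap_append_mset]
      rw [hdelta, ih c hndt hxt hct]
      rw [show pvScore z x = pvScore x z from pvScore_comm z x]
      rw [show (↑(List.replicate (c z).toNat (pvScore x z)) : Multiset Int)
            = Multiset.replicate (c z).toNat (pvScore x z) from Multiset.coe_replicate _ _]
      abel

theorem appendNew (x : Int) : ∀ (ks : List Int) (c : Int → Int), x ∉ ks →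
    c x = 1 →
    (↑(expandW (pvW c (ks ++ [x]))) : Multiset Int)
      = ↑(expandW (pvW c ks))
        + ↑(ks.flatMap (fun y => List.replicate (c y).toNat (pvScore y x))) := by
  intro ks
  induction ks with
  | nil =>
    intro c hx h1
    have : pvW c ([] ++ [x]) = [pvEnt c x x] := rfl
    rw [this]
    simp [pvEnt, expandW, h1, pvW]
  | cons z r ih =>
    intro c hx h1
    have hzx : ¬ (z = x) := fun h => hx (h ▸ List.mem_cons_self)
    have hxr : x ∉ r := fun h => hx (List.mem_cons_of_mem z h)
    have hrow : (z :: (r ++ [x])).map (pvEnt c z)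
        = (z :: r).map (pvEnt c z) ++ [(pvScore z x, c z)] := by
      rw [show (z :: (r ++ [x])) = (z :: r) ++ [x] from rfl, List.map_append]
      congr 1
      simp [pvEnt, if_neg hzx, h1]
    rw [show pvW c ((z :: r) ++ [x]) = (z :: (r ++ [x])).map (pvEnt c z) ++ pvW c (r ++ [x]) from rfl,
        show pvW c (z :: r) = (z :: r).map (pvEnt c z) ++ pvW c r from rfl,
        expandW_append, expandW_append, hrow, expandW_append, List.flatMap_cons]
    simp only [← Multiset.coe_add]
    rw [ih c hxr h1]
    rw [show expandW [(pvScore z x, c z)] = List.replicate (c z).toNat (pvScore z x) from by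
      simp [expandW]]
    abel

theorem mainMset : ∀ (l : List Int),
    (↑(expandW (pvW (fun v => (l.count v : Int)) (PySem.Set.ofList l))) : Multiset Int)
      = ↑(pairScores l) := by
  intro l
  induction l using List.reverseRecOn with
  | nil => simp [pvW, pairScores, expandW, PySem.Set.ofList_nil]
  | append_singleton l x ih =>
    have hcount : (fun v => (((l ++ [x]).count v : Nat) : Int))
        = fun v => ((l.count v : Nat) : Int) + if v = x then 1 else 0 := by
      funext v
      by_cases h : v = x <;> simp [List.count_append, h, List.count_eq_zero_of_not_mem]
    rw [PySem.Set.ofList_append_singleton, hcount]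
    by_cases hx : x ∈ l
    · rw [PySem.Set.add_of_mem ((PySem.Set.mem_ofList l x).mpr hx)]
      rw [bump x (PySem.Set.ofList l) (fun v => ((l.count v : Nat) : Int))
        (PySem.Set.nodup_ofList l) ((PySem.Set.mem_ofList l x).mpr hx) (fun y _ => Int.natCast_nonneg _)]
      rw [ih, pairScores_append]
      congr 1
      have htn : (PySem.Set.ofList l).flatMap
            (fun y => List.replicate (((l.count y : Nat) : Int)).toNat (pvScore x y))
          = (PySem.Set.ofList l).flatMap (fun y => List.replicate (l.count y) (pvScore x y)) := by
        apply List.flatMap_congr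
        intro y _
        rw [Int.toNat_natCast]
      rw [htn, countExpand (PySem.Set.ofList l) (fun y => pvScore x y)
        (PySem.Set.nodup_ofList l) l (fun y hy => (PySem.Set.mem_ofList l y).mpr hy)]
      congr 1
      exact List.map_congr_left (fun y _ => pvScore_comm x y)
    · rw [PySem.Set.add_of_not_mem (fun h => hx ((PySem.Set.mem_ofList l x).mp h))]
      have hxs : x ∉ PySem.Set.ofList l := fun h => hx ((PySem.Set.mem_ofList l x).mp h)
      have h1 : ((l.count x : Nat) : Int) + (if x = x then 1 else 0) = 1 := by
        simp [List.count_eq_zero_of_not_mem hx]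
      rw [appendNew x (PySem.Set.ofList l)
            (fun v => ((l.count v : Nat) : Int) + if v = x then 1 else 0) hxs h1]
      rw [pvW_congr (fun v => ((l.count v : Nat) : Int) + if v = x then 1 else 0)
            (fun v => ((l.count v : Nat) : Int)) (PySem.Set.ofList l)
            (fun y hy => by
              have hyx : ¬ (y = x) := fun h => hx (h ▸ (PySem.Set.mem_ofList l y).mp hy)
              simp [hyx])]
      have htn : (PySem.Set.ofList l).flatMap (fun y =>
            List.replicate (((l.count y : Nat) : Int) + if y = x then 1 else 0).toNat (pvScore y x))
          = (PySem.Set.ofList l).flatMap (fun y => List.replicate (l.count y) (pvScore y x)) := by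
        apply List.flatMap_congr
        intro y hy
        have hyx : ¬ (y = x) := fun h => hx (h ▸ (PySem.Set.mem_ofList l y).mp hy)
        simp [hyx]
      rw [htn, countExpand (PySem.Set.ofList l) (fun y => pvScore y x)
            (PySem.Set.nodup_ofList l) l (fun y hy => (PySem.Set.mem_ofList l y).mpr hy),
          ih, pairScores_append]

-- ===== VERDICT (by name: the statement is the Claim_ definition above) =====
theorem findTeams_spec : Claim_equal_findTeams := by
  intro n m a _ _
  unfold Spec_findTeams
  set l := a.map pvParse with hl
  set c : Int → Int := fun v => (l.count v : Int) with hc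
  set ks := PySem.Set.ofList l with hks
  have hA : findTeams n m a = (pairScores l).foldl pvStep (0, 0) := findTeams_eq_pairs n m a
  have hB : findTeams_alt n m a = (pvW c ks).foldl wStep (0, 0) := findTeams_alt_eq n m a
  have hw : ∀ q ∈ pvW c ks, 0 ≤ q.2 :=
    weights_nonneg c ks (fun y _ => by simp [hc])
  rw [hA, hB, wexpand _ _ hw, char0, char0]
  have hperm : (expandW (pvW c ks)).Perm (pairScores l) :=
    Multiset.coe_eq_coe.mp (mainMset l)
  rw [hperm.foldl_op_eq, hperm.count_eq]
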